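-- pv_equiv track=rewrite | github.com/Roberttguo/algorithm_data_structure | find second maximum and second minimum.py | find_Positive_2ndMaxMin
-- ===== SOURCE A (Python) =====
-- def find_Positive_2ndMaxMin(arr):
--
--     max_v=-2**32
--     second_max=-2**32
--     min_v=2**32
--     second_min=2**32
--
--     for e in arr:
--         if e>=0:
--             if e>max_v:
--                 second_max=max_v
--                 max_v=e
--             else:
--                 if e>second_max:
--                     second_max=e
--             if e<min_v:
--                 second_min=min_v
--                 min_v=e
--             else:
--                 if e<second_min:
--                     second_min=e
--     return (min_v, second_min, max_v, second_max)
-- ===== SOURCE B (Python) =====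
-- def find_Positive_2ndMaxMin(arr):
--     pos = sorted(e for e in arr if e >= 0)
--     min_v = pos[0] if pos else 2**32
--     second_min = pos[1] if len(pos) >= 2 else 2**32
--     max_v = pos[-1] if pos else -2**32
--     second_max = pos[-2] if len(pos) >= 2 else -2**32
--     return (min_v, second_min, max_v, second_max)
-- ===== Notes on version B (the rewrite author's own statement) =====
-- stated objective: alternative
-- what changed: Replaces A's four-variable online scan over the array with filtering the non-negative elements, sorting them, and reading the min/second-min/max/second-max directly off the sorted list (same -2**32 / 2**32 sentinels when fewer than two non-negatives exist).
import Mathlib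
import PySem

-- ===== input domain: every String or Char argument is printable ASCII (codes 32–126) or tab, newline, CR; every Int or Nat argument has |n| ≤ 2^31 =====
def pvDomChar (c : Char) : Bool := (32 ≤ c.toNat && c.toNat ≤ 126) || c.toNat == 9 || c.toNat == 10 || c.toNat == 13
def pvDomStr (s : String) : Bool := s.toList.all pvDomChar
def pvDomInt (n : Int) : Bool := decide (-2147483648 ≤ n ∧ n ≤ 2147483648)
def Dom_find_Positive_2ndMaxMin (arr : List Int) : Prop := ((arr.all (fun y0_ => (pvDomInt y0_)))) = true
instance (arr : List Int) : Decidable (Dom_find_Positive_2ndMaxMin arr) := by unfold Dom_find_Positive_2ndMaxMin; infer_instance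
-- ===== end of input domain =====

-- B replaces A's four-variable online scan by filter-nonnegatives, sort, then direct index
-- reads (alternative decomposition, same sentinels); return values proved equal on the whole domain.

-- ===== PORT A =====
-- A's loop body, split into the (max_v, second_max) and (min_v, second_min) pair updates.
def pvTop (p : Int × Int) (e : Int) : Int × Int :=
  if e > p.1 then (e, p.1) else if e > p.2 then (p.1, e) else p

def pvBot (p : Int × Int) (e : Int) : Int × Int :=
  if e < p.1 then (e, p.1) else if e < p.2 then (p.1, e) else p

def pvStep (st : (Int × Int) × (Int × Int)) (e : Int) : (Int × Int) × (Int × Int) :=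
  if e ≥ 0 then (pvTop st.1 e, pvBot st.2 e) else st

def find_Positive_2ndMaxMin (arr : List Int) : Int × Int × Int × Int :=
  let st := arr.foldl pvStep ((-4294967296, -4294967296), (4294967296, 4294967296))
  (st.2.1, st.2.2, st.1.1, st.1.2)

-- ===== PORT B =====
def find_Positive_2ndMaxMin_alt (arr : List Int) : Int × Int × Int × Int :=
  let pos := PySem.List.sorted (arr.filter (fun e => e ≥ 0)) (fun x => x) false
  let min_v := if pos ≠ [] then (PySem.List.pyGet? pos 0).getD 0 else 4294967296
  let second_min := if 2 ≤ pos.length then (PySem.List.pyGet? pos 1).getD 0 else 4294967296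
  let max_v := if pos ≠ [] then (PySem.List.pyGet? pos (-1)).getD 0 else -4294967296
  let second_max := if 2 ≤ pos.length then (PySem.List.pyGet? pos (-2)).getD 0 else -4294967296
  (min_v, second_min, max_v, second_max)

-- ===== PRECONDITION & SPEC =====
def Spec_find_Positive_2ndMaxMin (arr : List Int) (out : Int × Int × Int × Int) : Prop := out = find_Positive_2ndMaxMin_alt arr
instance (arr : List Int) (out : Int × Int × Int × Int) : Decidable (Spec_find_Positive_2ndMaxMin arr out) := by unfold Spec_find_Positive_2ndMaxMin; infer_instance

-- ===== CLAIM (what is proved, stated in full; the proofs are below) =====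
def Claim_equal_find_Positive_2ndMaxMin : Prop := ∀ (arr : List Int), Dom_find_Positive_2ndMaxMin arr → Spec_find_Positive_2ndMaxMin arr (find_Positive_2ndMaxMin arr)

-- ===== LEMMAS AND PROOFS =====

theorem pvTop_comm (p : Int × Int) (a b : Int) : pvTop (pvTop p a) b = pvTop (pvTop p b) a := by
  rcases p with ⟨m, s⟩
  simp only [pvTop]
  split_ifs <;> simp_all [Prod.ext_iff] <;> omega

theorem pvBot_comm (p : Int × Int) (a b : Int) : pvBot (pvBot p a) b = pvBot (pvBot p b) a := by
  rcases p with ⟨m, s⟩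
  simp only [pvBot]
  split_ifs <;> simp_all [Prod.ext_iff] <;> omega

theorem pvStep_comm (st : (Int × Int) × (Int × Int)) (a b : Int) :
    pvStep (pvStep st a) b = pvStep (pvStep st b) a := by
  by_cases ha : a ≥ 0 <;> by_cases hb : b ≥ 0 <;>
    simp [pvStep, ha, hb, pvTop_comm, pvBot_comm]

theorem pvFoldl_perm {l₁ l₂ : List Int} (h : l₁.Perm l₂) :
    ∀ st, l₁.foldl pvStep st = l₂.foldl pvStep st := by
  induction h with
  | nil => intro st; rfl
  | cons x _ ih => intro st; simp only [List.foldl_cons]; exact ih _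
  | swap x y l => intro st; simp only [List.foldl_cons]; rw [pvStep_comm]
  | trans _ _ ih₁ ih₂ => intro st; rw [ih₁, ih₂]

theorem pvFoldl_filter (arr : List Int) :
    ∀ st, arr.foldl pvStep st = (arr.filter (fun e => e ≥ 0)).foldl pvStep st := by
  induction arr with
  | nil => intro st; rfl
  | cons x t ih =>
    intro st
    by_cases hx : x ≥ 0
    · simp only [List.filter_cons, hx, decide_true, if_true, List.foldl_cons]; exact ih _
    · have hstep : pvStep st x = st := by simp [pvStep, hx]
      simp only [List.filter_cons, List.foldl_cons, hstep]
      simp only [show (decide (x ≥ 0)) = false by simp [hx]]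
      exact ih st

-- the tuple ((last, second-last), (head, second)) that A's state reaches on an ascending list
def pvExtract (s : List Int) : (Int × Int) × (Int × Int) :=
  ((s.getLastD (-4294967296), s.dropLast.getLastD (-4294967296)),
   (s.headD 4294967296, s.tail.headD 4294967296))

theorem pvGetLastD_mem (l : List Int) (h : l ≠ []) (d : Int) : l.getLastD d ∈ l := by
  rw [List.getLastD_eq_getLast?, List.getLast?_eq_some_getLast h]
  exact List.getLast_mem h

theorem pvGetLastD_concat (l : List Int) (e d : Int) : (l ++ [e]).getLastD d = e := by
  rw [List.getLastD_eq_getLast?, List.getLast?_concat]; rfl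

theorem pvStep_extract (l : List Int) (e : Int) (he0 : 0 ≤ e) (heB : e < 4294967296)
    (hl0 : ∀ x ∈ l, 0 ≤ x) (hle : ∀ x ∈ l, x ≤ e) :
    pvStep (pvExtract l) e = pvExtract (l ++ [e]) := by
  rcases l with _ | ⟨x, _ | ⟨y, t⟩⟩
  · simp only [pvExtract, pvStep, pvTop, pvBot, List.nil_append]
    split_ifs <;> simp_all [Prod.mk.injEq] <;> omega
  · have hx0 : 0 ≤ x := hl0 x (by simp)
    have hxe : x ≤ e := hle x (by simp)
    simp only [pvExtract, pvStep, pvTop, pvBot]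
    split_ifs <;> simp_all [Prod.mk.injEq] <;> omega
  · have hne2 : x :: y :: t ≠ [] := by simp
    have hdne : (x :: y :: t).dropLast ≠ [] := by simp
    have hmxe : (x :: y :: t).getLastD (-4294967296) ≤ e :=
      hle _ (pvGetLastD_mem _ hne2 _)
    have hsme : (x :: y :: t).dropLast.getLastD (-4294967296) ≤ e :=
      hle _ (List.mem_of_mem_dropLast (pvGetLastD_mem _ hdne _))
    have hxe : x ≤ e := hle x (by simp)
    have hye : y ≤ e := hle y (by simp)
    have hdl : ((x :: y :: t) ++ [e]).dropLast = x :: y :: t := List.dropLast_concat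
    have hgl : ((x :: y :: t) ++ [e]).getLastD (-4294967296) = e := pvGetLastD_concat _ _ _
    have hhd : ((x :: y :: t) ++ [e]).headD 4294967296 = x := by simp
    have htl : ((x :: y :: t) ++ [e]).tail.headD 4294967296 = y := by simp
    simp only [pvExtract]
    rw [hdl, hgl, hhd, htl]
    simp only [pvStep, pvTop, pvBot, List.headD_cons, List.tail_cons]
    split_ifs <;> simp_all [Prod.mk.injEq] <;> omega

theorem pvFold_sorted (s : List Int) (hs : s.Pairwise (· ≤ ·))
    (hlb : ∀ x ∈ s, 0 ≤ x) (hub : ∀ x ∈ s, x < 4294967296) :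
    s.foldl pvStep ((-4294967296, -4294967296), (4294967296, 4294967296)) = pvExtract s := by
  induction s using List.reverseRecOn with
  | nil => rfl
  | append_singleton l e ih =>
    have hp := List.pairwise_append.mp hs
    have hle : ∀ x ∈ l, x ≤ e := fun x hx => hp.2.2 x hx e (List.mem_singleton_self e)
    have hl0 : ∀ x ∈ l, 0 ≤ x := fun x hx => hlb x (by simp [hx])
    rw [List.foldl_append, ih hp.1 hl0 (fun x hx => hub x (by simp [hx])),
      List.foldl_cons, List.foldl_nil,
      pvStep_extract l e (hlb e (by simp)) (hub e (by simp)) hl0 hle]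

theorem pvIdx0 (pos : List Int) (h : pos ≠ []) :
    (PySem.List.pyGet? pos 0).getD 0 = pos.headD 4294967296 := by
  rcases pos with _ | ⟨x, t⟩
  · exact absurd rfl h
  · simp [PySem.List.pyGet?, PySem.List.pyIdx?]

theorem pvIdx1 (pos : List Int) (h : 2 ≤ pos.length) :
    (PySem.List.pyGet? pos 1).getD 0 = pos.tail.headD 4294967296 := by
  rcases pos with _ | ⟨x, _ | ⟨y, t⟩⟩ <;> simp_all [PySem.List.pyGet?, PySem.List.pyIdx?]

theorem pvIdxN1 (pos : List Int) (h : pos ≠ []) :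
    (PySem.List.pyGet? pos (-1)).getD 0 = pos.getLastD (-4294967296) := by
  rw [PySem.List.pyGet?_neg_one]
  rcases List.eq_nil_or_concat pos with rfl | ⟨l, a, rfl⟩
  · exact absurd rfl h
  · rw [List.concat_eq_append, List.getLast?_concat, pvGetLastD_concat]; rfl

theorem pvIdxN2 (pos : List Int) (h : 2 ≤ pos.length) :
    (PySem.List.pyGet? pos (-2)).getD 0 = pos.dropLast.getLastD (-4294967296) := by
  rcases List.eq_nil_or_concat pos with rfl | ⟨l, a, rfl⟩
  · simp at h
  · rcases List.eq_nil_or_concat l with rfl | ⟨m, c, rfl⟩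
    · simp at h
    · simp only [List.concat_eq_append] at h ⊢
      have hlen : ((m ++ [c]) ++ [a]).length = m.length + 2 := by simp
      rw [PySem.List.pyGet?_neg_ofNat _ 2 (by omega) (by omega)]
      have hidx : ((m ++ [c]) ++ [a]).length - 2 = m.length := by simp
      rw [hidx, List.append_assoc]
      have hget : (m ++ ([c] ++ [a]))[m.length]? = some c := by
        rw [List.getElem?_append_right (by omega)]
        simp
      rw [hget, ← List.append_assoc, List.dropLast_concat, pvGetLastD_concat]
      rfl

-- ===== VERDICT (by name: the statement is the Claim_ definition above) =====
theorem find_Positive_2ndMaxMin_spec : Claim_equal_find_Positive_2ndMaxMin := by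
  intro arr hdom
  unfold Spec_find_Positive_2ndMaxMin
  have hbound : ∀ x ∈ arr, x ≤ 2147483648 := by
    intro x hx
    have := List.all_eq_true.mp hdom x hx
    simp [pvDomInt] at this
    omega
  set f := arr.filter (fun e => e ≥ 0) with hf
  set s := PySem.List.sorted f (fun x => x) false with hsdef
  have hperm : s.Perm f := PySem.List.sorted_perm f _ _
  have hlb : ∀ x ∈ s, 0 ≤ x := by
    intro x hx
    have hmem := hperm.mem_iff.mp hx
    rw [hf, List.mem_filter] at hmem
    simpa using hmem.2
  have hub : ∀ x ∈ s, x < 4294967296 := by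
    intro x hx
    have hmem := hperm.mem_iff.mp hx
    rw [hf, List.mem_filter] at hmem
    have := hbound x hmem.1
    omega
  have hpw : s.Pairwise (· ≤ ·) := by
    have := PySem.List.sorted_pairwise f (fun x => x)
    simpa [hsdef] using this
  have hA : find_Positive_2ndMaxMin arr =
      (s.headD 4294967296, s.tail.headD 4294967296,
       s.getLastD (-4294967296), s.dropLast.getLastD (-4294967296)) := by
    unfold find_Positive_2ndMaxMin
    rw [pvFoldl_filter arr, ← hf, pvFoldl_perm hperm.symm, pvFold_sorted s hpw hlb hub]
    rfl
  rw [hA]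
  unfold find_Positive_2ndMaxMin_alt
  rw [← hf, ← hsdef]
  by_cases h2 : 2 ≤ s.length
  · have hne : s ≠ [] := by intro h; rw [h] at h2; simp at h2
    simp only [hne, h2, ne_eq, not_false_iff, if_pos]
    rw [pvIdx0 s hne, pvIdx1 s h2, pvIdxN1 s hne, pvIdxN2 s h2]
  · rcases s with _ | ⟨x, _ | ⟨y, t⟩⟩
    · simp
    · simp [PySem.List.pyGet?, PySem.List.pyIdx?]
    · simp at h2
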